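-- pv_equiv track=rewrite | github.com/jhee514/Algorithms | 04_cleanslate/19939.py | solution
-- ===== SOURCE A (Python) =====
-- def solution(n, k):
--     balls = n
--     basket = [0] * k
--     # 모든 바구니가 최소 1개의 공을 가져야
--     for i in range(k):
--         basket[i] += (i+1)
--         if sum(basket) > n:
--             return -1
--     balls -= sum(basket)
--     while balls:
--         for j in range(k-1, -1, -1):
--             if balls:
--                 basket[j] += 1
--                 balls -= 1
--             else:
--                 break
--     return basket[-1] - basket[0]
-- ===== SOURCE B (Python) =====
-- def solution(n, k):
--     t = k * (k + 1) // 2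
--     if n < t:
--         return -1
--     return (k - 1) + (1 if (n - t) % k else 0)
-- ===== Notes on version B (the rewrite author's own statement) =====
-- stated objective: faster
-- what changed: Replaced the incremental basket-filling loop and the one-ball-at-a-time distribution while-loop by the closed form: feasible iff n >= k(k+1)/2, and the max-min difference is (k-1) plus 1 iff the leftover (n - k(k+1)/2) is not divisible by k.
import Mathlib
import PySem

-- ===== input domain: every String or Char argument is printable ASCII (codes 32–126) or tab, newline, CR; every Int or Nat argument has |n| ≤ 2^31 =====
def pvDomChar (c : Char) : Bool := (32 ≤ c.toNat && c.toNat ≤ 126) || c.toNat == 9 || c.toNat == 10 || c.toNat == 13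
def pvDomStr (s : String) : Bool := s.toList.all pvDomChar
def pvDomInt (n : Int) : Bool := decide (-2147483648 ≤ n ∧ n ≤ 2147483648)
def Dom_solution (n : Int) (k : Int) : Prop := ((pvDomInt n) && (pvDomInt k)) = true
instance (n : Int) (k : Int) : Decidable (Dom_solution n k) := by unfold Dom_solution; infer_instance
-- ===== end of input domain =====

-- B replaces A's ball-by-ball distribution loops by a closed-form formula (measured faster).

-- ===== PORT A =====
-- sum(basket) as a left fold (Python's sum is iterative; Mathlib's List.sum is a foldr
-- whose recursion overflows on long baskets — same value, lemma List.sum_eq_foldl)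
def pySum (xs : List Int) : Int := xs.foldl (· + ·) 0

-- one step of the 'for i in range(k)' loop; none = the early 'return -1' (absorbing)
def firstStep (n : Int) (st : Option (List Int)) (i : Int) : Option (List Int) :=
  match st with
  | none => none
  | some basket =>
    if pySum (PySem.List.pySetD basket i (PySem.List.pyGetD basket i 0 + (i + 1))) > n then none
    else some (PySem.List.pySetD basket i (PySem.List.pyGetD basket i 0 + (i + 1)))

-- one step of the inner 'for j in range(k-1, -1, -1)' loop; the 'break' leaves the state unchanged
def innerStepF (st : List Int × Int) (j : Int) : List Int × Int :=
  if st.2 ≠ 0 then (PySem.List.pySetD st.1 j (PySem.List.pyGetD st.1 j 0 + 1), st.2 - 1)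
  else st

def solution (n : Int) (k : Int) : Int :=
  match (PySem.List.pyRange 0 k 1).foldl (firstStep n) (some (List.replicate k.toNat 0)) with
  | none => -1
  | some basket =>
    let balls := n - pySum basket
    -- the 'while balls' loop: it runs at most balls times, each pass is the inner for-loop
    let st := (List.range (balls.toNat + 1)).foldl
      (fun st _ => if st.2 ≠ 0 then (PySem.List.pyRange (k - 1) (-1) (-1)).foldl innerStepF st else st)
      (basket, balls)
    PySem.List.pyGetD st.1 (-1) 0 - PySem.List.pyGetD st.1 0 0

-- ===== PORT B =====
def solution_alt (n : Int) (k : Int) : Int :=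
  let t := PySem.Int.floordiv (k * (k + 1)) 2
  if n < t then -1
  else (k - 1) + (if PySem.Int.mod (n - t) k ≠ 0 then 1 else 0)

-- ===== PRECONDITION & SPEC =====
-- Pre_ excludes k ≤ 0, on which A never returns a value: for k ≤ 0 A either raises
-- IndexError (basket[-1] on the empty basket) or loops forever in 'while balls'.
def Pre_solution (n : Int) (k : Int) : Prop := 0 < k
instance (n : Int) (k : Int) : Decidable (Pre_solution n k) := by unfold Pre_solution; infer_instance
def pvWitness_solution : Int × Int := (10, 3)

def Spec_solution (n : Int) (k : Int) (out : Int) : Prop := out = solution_alt n k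
instance (n : Int) (k : Int) (out : Int) : Decidable (Spec_solution n k out) := by unfold Spec_solution; infer_instance

-- ===== CLAIM (what is proved, stated in full; the proofs are below) =====
def Claim_equal_solution : Prop := ∀ (n : Int) (k : Int), Dom_solution n k → Pre_solution n k → Spec_solution n k (solution n k)

-- ===== LEMMAS AND PROOFS =====

-- recursive views of the three loops (proof-side only; the ports use the folds)
def firstLoop (n : Int) : List Int → List Int → Option (List Int)
  | [], basket => some basket
  | i :: rest, basket =>
    if (PySem.List.pySetD basket i (PySem.List.pyGetD basket i 0 + (i + 1))).sum > n then none
    else firstLoop n rest (PySem.List.pySetD basket i (PySem.List.pyGetD basket i 0 + (i + 1)))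

def innerLoop : List Int → List Int → Int → List Int × Int
  | [], basket, balls => (basket, balls)
  | j :: rest, basket, balls =>
    if balls ≠ 0 then
      innerLoop rest (PySem.List.pySetD basket j (PySem.List.pyGetD basket j 0 + 1)) (balls - 1)
    else (basket, balls)

def whileLoop (k : Int) : Nat → List Int → Int → List Int × Int
  | 0, basket, balls => (basket, balls)
  | fuel + 1, basket, balls =>
    if balls ≠ 0 then
      let s := innerLoop (PySem.List.pyRange (k - 1) (-1) (-1)) basket balls
      whileLoop k fuel s.1 s.2
    else (basket, balls)

lemma pySum_eq_sum (xs : List Int) : pySum xs = xs.sum := by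
  rw [pySum, List.sum_eq_foldl]

lemma firstFold_none (n : Int) (js : List Int) : js.foldl (firstStep n) none = none := by
  induction js with
  | nil => rfl
  | cons i rest ih => simpa [firstStep] using ih

lemma firstFold_eq (n : Int) (js : List Int) (basket : List Int) :
    js.foldl (firstStep n) (some basket) = firstLoop n js basket := by
  induction js generalizing basket with
  | nil => rfl
  | cons i rest ih =>
    rw [List.foldl_cons, firstLoop]
    simp only [firstStep, pySum_eq_sum]
    by_cases h : (PySem.List.pySetD basket i (PySem.List.pyGetD basket i 0 + (i + 1))).sum > n
    · rw [if_pos h, if_pos h]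
      exact firstFold_none n rest
    · rw [if_neg h, if_neg h]
      exact ih _

-- triangle numbers, the partial sums A's first loop accumulates
def tri : Nat → Int
  | 0 => 0
  | m + 1 => tri m + (m + 1)

-- the basket after A's first loop has processed indices 0..j-1
def Bk (K j : Nat) : List Int :=
  (List.range' 1 j).map Int.ofNat ++ List.replicate (K - j) 0

lemma tri_two_mul (m : Nat) : 2 * tri m = (m : Int) * (m + 1) := by
  induction m with
  | zero => simp [tri]
  | succ m ih => rw [tri]; push_cast; push_cast at ih; linear_combination ih

lemma tri_mono {a b : Nat} (h : a ≤ b) : tri a ≤ tri b := by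
  induction b with
  | zero => simp_all
  | succ b ih =>
    rcases Nat.lt_or_ge a (b + 1) with h' | h'
    · have := ih (by omega)
      rw [tri]; have : (0:Int) ≤ (b:Int) + 1 := by positivity
      omega
    · have : a = b + 1 := by omega
      simp [this]

lemma sum_range'_map (j : Nat) :
    ((List.range' 1 j).map Int.ofNat).sum = tri j := by
  induction j with
  | zero => simp [tri]
  | succ j ih =>
    rw [List.range'_concat, List.map_append, List.sum_append, ih, tri]
    simp
    omega

lemma length_Bk (K j : Nat) (h : j ≤ K) : (Bk K j).length = K := by
  simp [Bk]; omega

lemma sum_Bk (K j : Nat) : (Bk K j).sum = tri j := by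
  rw [Bk, List.sum_append, sum_range'_map]
  simp

lemma getD_mid (pre : List Int) (x : Int) (rest : List Int) (m : Nat) (hm : pre.length = m) :
    (pre ++ x :: rest).getD m 0 = x := by
  subst hm; simp [List.getD]

lemma set_mid (pre : List Int) (x v : Int) (rest : List Int) (m : Nat) (hm : pre.length = m) :
    (pre ++ x :: rest).set m v = pre ++ v :: rest := by
  subst hm; simp

-- innerLoop facts -------------------------------------------------------

lemma innerLoop_zero (js : List Int) (basket : List Int) :
    innerLoop js basket 0 = (basket, 0) := by
  cases js <;> simp [innerLoop]

lemma innerFold_eq (js : List Int) (st : List Int × Int) :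
    js.foldl innerStepF st = innerLoop js st.1 st.2 := by
  induction js generalizing st with
  | nil => rfl
  | cons j rest ih =>
    rw [List.foldl_cons, innerLoop]
    by_cases h : st.2 = 0
    · rw [if_neg (by simp [h])]
      rw [innerStepF, if_neg (by simp [h]), ih, h, innerLoop_zero]
    · rw [if_pos h]
      rw [innerStepF, if_pos h, ih]

lemma whileLoop_balls_zero (k : Int) (fuel : Nat) (basket : List Int) :
    whileLoop k fuel basket 0 = (basket, 0) := by
  cases fuel <;> simp [whileLoop]

lemma whileFold_eq (k : Int) (l : List Nat) (st : List Int × Int) :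
    l.foldl
      (fun st _ => if st.2 ≠ 0 then (PySem.List.pyRange (k - 1) (-1) (-1)).foldl innerStepF st else st)
      st = whileLoop k l.length st.1 st.2 := by
  induction l generalizing st with
  | nil => simp [whileLoop]
  | cons x rest ih =>
    rw [List.foldl_cons, List.length_cons, whileLoop]
    by_cases h : st.2 = 0
    · rw [if_neg (by simp [h]), if_neg (by simp [h]), ih, h, whileLoop_balls_zero]
    · rw [if_pos h, if_pos h, innerFold_eq, ih]

lemma innerLoop_append (xs ys : List Int) (basket : List Int) (b : Int) :
    innerLoop (xs ++ ys) basket b =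
      innerLoop ys (innerLoop xs basket b).1 (innerLoop xs basket b).2 := by
  induction xs generalizing basket b with
  | nil => simp [innerLoop]
  | cons x xs ih =>
    by_cases hb : b = 0
    · subst hb; simp [innerLoop, innerLoop_zero]
    · simp only [List.cons_append, innerLoop, hb, ne_eq, not_false_eq_true, if_true]
      exact ih _ _

lemma innerLoop_balls_len (js : List Int) (basket : List Int) (b : Int) (hb : 0 ≤ b) :
    (innerLoop js basket b).2 = b - min b js.length ∧
    (innerLoop js basket b).1.length = basket.length := by
  induction js generalizing basket b with
  | nil => simp [innerLoop]; omega
  | cons j rest ih =>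
    by_cases h0 : b = 0
    · subst h0; rw [innerLoop_zero]
      refine ⟨?_, rfl⟩
      have : (0:Int) ≤ (rest.length : Int) + 1 := by positivity
      simp; omega
    · obtain ⟨h1, h2⟩ := ih (PySem.List.pySetD basket j (PySem.List.pyGetD basket j 0 + 1)) (b - 1) (by omega)
      rw [innerLoop, if_pos h0]
      refine ⟨?_, ?_⟩
      · rw [h1]
        have hl : (0:Int) ≤ rest.length := by positivity
        simp; omega
      · rw [h2, PySem.List.length_pySetD]

lemma innerLoop_untouched (js : List Int) (basket : List Int) (b : Int) (p : Int)
    (hp : 0 ≤ p) (h : ∀ j ∈ js, 0 ≤ j ∧ j ≠ p) :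
    PySem.List.pyGetD (innerLoop js basket b).1 p 0 = PySem.List.pyGetD basket p 0 := by
  induction js generalizing basket b with
  | nil => simp [innerLoop]
  | cons j rest ih =>
    by_cases h0 : b = 0
    · subst h0; rw [innerLoop_zero]
    · obtain ⟨hj0, hjp⟩ := h j (by simp)
      rw [innerLoop, if_pos h0]
      rw [ih _ _ (fun j hj => h j (by simp [hj]))]
      rw [PySem.List.pySetD_of_nonneg _ _ hj0,
          PySem.List.pyGetD_of_nonneg _ _ hp, PySem.List.pyGetD_of_nonneg _ _ hp]
      rw [List.getD]
      rw [List.getElem?_set_ne (by omega)]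
      rfl

lemma innerLoop_head (j : Int) (rest : List Int) (basket : List Int) (b : Int)
    (hb : b ≠ 0) (hj : 0 ≤ j) (hlt : j < basket.length)
    (h : ∀ j' ∈ rest, 0 ≤ j' ∧ j' ≠ j) :
    PySem.List.pyGetD (innerLoop (j :: rest) basket b).1 j 0 =
      PySem.List.pyGetD basket j 0 + 1 := by
  rw [innerLoop, if_pos hb]
  rw [innerLoop_untouched _ _ _ _ hj h]
  rw [PySem.List.pySetD_of_nonneg _ _ hj,
      PySem.List.pyGetD_of_nonneg _ _ hj, PySem.List.pyGetD_of_nonneg _ _ hj]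
  have hnat : j.toNat < basket.length := by omega
  simp [List.getD, hnat]

-- the countdown range splits off its last element 0
lemma pyRange_countdown_split (k : Int) (hk : 0 < k) :
    PySem.List.pyRange (k - 1) (-1) (-1) = PySem.List.pyRange (k - 1) 0 (-1) ++ [0] := by
  rw [PySem.List.pyRange_neg_one, PySem.List.pyRange_neg_one]
  have h1 : (k - 1 - -1).toNat = (k - 1 - 0).toNat + 1 := by omega
  rw [h1, List.range_succ, List.map_append]
  congr 1
  simp
  omega

lemma length_countdown (a : Int) : (PySem.List.pyRange a 0 (-1)).length = a.toNat := by
  rw [PySem.List.pyRange_neg_one]; simp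

-- one full pass of the inner loop over the countdown range
lemma innerStep (k : Int) (hk : 0 < k) (basket : List Int) (b : Int) (hb : 0 ≤ b)
    (hlen : (basket.length : Int) = k) :
    (innerLoop (PySem.List.pyRange (k - 1) (-1) (-1)) basket b).2 = b - min b k ∧
    (innerLoop (PySem.List.pyRange (k - 1) (-1) (-1)) basket b).1.length = basket.length ∧
    PySem.List.pyGetD (innerLoop (PySem.List.pyRange (k - 1) (-1) (-1)) basket b).1 (k - 1) 0 =
      PySem.List.pyGetD basket (k - 1) 0 + (if b ≠ 0 then 1 else 0) ∧
    PySem.List.pyGetD (innerLoop (PySem.List.pyRange (k - 1) (-1) (-1)) basket b).1 0 0 =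
      PySem.List.pyGetD basket 0 0 + (if k ≤ b then 1 else 0) := by
  have hlenjs : (PySem.List.pyRange (k - 1) (-1) (-1)).length = k.toNat := by
    rw [PySem.List.pyRange_neg_one]; simp
  obtain ⟨hbl1, hbl2⟩ := innerLoop_balls_len (PySem.List.pyRange (k - 1) (-1) (-1)) basket b hb
  refine ⟨?_, hbl2, ?_, ?_⟩
  · rw [hbl1, hlenjs]; omega
  · by_cases h0 : b = 0
    · subst h0; rw [innerLoop_zero]; simp
    · rw [PySem.List.pyRange_neg_one_cons (by omega)]
      rw [innerLoop_head (k - 1) _ basket b h0 (by omega) (by omega)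
          (fun j' hj' => by rw [PySem.List.mem_pyRange_neg_one] at hj'; omega)]
      simp [h0]
  · rw [pyRange_countdown_split k hk, innerLoop_append]
    obtain ⟨hf1, hf2⟩ := innerLoop_balls_len (PySem.List.pyRange (k - 1) 0 (-1)) basket b hb
    have hfront : ∀ j ∈ PySem.List.pyRange (k - 1) 0 (-1), 0 ≤ j ∧ j ≠ 0 := by
      intro j hj; rw [PySem.List.mem_pyRange_neg_one] at hj; omega
    have hget0 : PySem.List.pyGetD (innerLoop (PySem.List.pyRange (k - 1) 0 (-1)) basket b).1 0 0
        = PySem.List.pyGetD basket 0 0 :=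
      innerLoop_untouched _ basket b 0 le_rfl hfront
    rw [length_countdown] at hf1
    by_cases hkb : k ≤ b
    · have hs2 : (innerLoop (PySem.List.pyRange (k - 1) 0 (-1)) basket b).2 = b - (k - 1) := by
        rw [hf1]; omega
      have hne : (innerLoop (PySem.List.pyRange (k - 1) 0 (-1)) basket b).2 ≠ 0 := by omega
      rw [innerLoop, if_pos hne, innerLoop]
      have h00 := PySem.List.pyGetD_pySetD_natCast
        (innerLoop (PySem.List.pyRange (k - 1) 0 (-1)) basket b).1 0 0
        (PySem.List.pyGetD (innerLoop (PySem.List.pyRange (k - 1) 0 (-1)) basket b).1 0 0 + 1) 0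
        (by rw [hf2]; omega)
      simp only [Nat.cast_zero] at h00
      rw [h00]
      simp [hget0, hkb]
    · have hs2 : (innerLoop (PySem.List.pyRange (k - 1) 0 (-1)) basket b).2 = 0 := by
        rw [hf1]; omega
      rw [hs2, innerLoop_zero]
      simp [hget0, hkb]

-- ceiling-vs-floor: the one-more-ball indicator
lemma ceil_div_eq (k b : Int) (hk : 0 < k) (hb : 0 ≤ b) :
    (b + k - 1) / k = b / k + (if b % k ≠ 0 then 1 else 0) := by
  have hdm := Int.mul_ediv_add_emod b k
  have hr0 : 0 ≤ b % k := Int.emod_nonneg b (by omega)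
  have hrk : b % k < k := Int.emod_lt_of_pos b hk
  by_cases h : b % k = 0
  · simp only [h, ne_eq, not_true_eq_false, if_false, add_zero]
    have he : b + k - 1 = (k - 1) + (b / k) * k := by linear_combination -hdm + h
    rw [he, Int.add_mul_ediv_right _ _ (by omega : k ≠ 0),
        Int.ediv_eq_zero_of_lt (by omega) (by omega), zero_add]
  · simp only [h, ne_eq, not_false_eq_true, if_true]
    have he : b + k - 1 = (b % k - 1) + (b / k + 1) * k := by linear_combination -hdm
    rw [he, Int.add_mul_ediv_right _ _ (by omega : k ≠ 0),
        Int.ediv_eq_zero_of_lt (by omega) (by omega), zero_add]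

lemma whileLoop_spec (k : Int) (hk : 0 < k) :
    ∀ (fuel : Nat) (b : Int) (basket : List Int), 0 ≤ b → b.toNat < fuel →
      ((basket.length : Int) = k) →
      (((whileLoop k fuel basket b).1.length : Int) = k ∧
      PySem.List.pyGetD (whileLoop k fuel basket b).1 0 0 =
        PySem.List.pyGetD basket 0 0 + b / k ∧
      PySem.List.pyGetD (whileLoop k fuel basket b).1 (k - 1) 0 =
        PySem.List.pyGetD basket (k - 1) 0 + (b + k - 1) / k) := by
  intro fuel
  induction fuel with
  | zero => intro b basket hb hf hlen; omega
  | succ f ih =>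
    intro b basket hb hf hlen
    by_cases h0 : b = 0
    · subst h0
      rw [whileLoop, if_neg (by simp)]
      refine ⟨hlen, ?_, ?_⟩
      · simp
      · rw [show (0:Int) + k - 1 = k - 1 by ring,
            Int.ediv_eq_zero_of_lt (by omega) (by omega), add_zero]
    · rw [whileLoop, if_pos h0]
      obtain ⟨hb2, hblen, hlast, hfirst⟩ := innerStep k hk basket b hb hlen
      have hb' : 0 ≤ (innerLoop (PySem.List.pyRange (k - 1) (-1) (-1)) basket b).2 := by
        rw [hb2]; omega
      have hf' : (innerLoop (PySem.List.pyRange (k - 1) (-1) (-1)) basket b).2.toNat < f := by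
        rw [hb2]; omega
      have hlen' : (((innerLoop (PySem.List.pyRange (k - 1) (-1) (-1)) basket b).1.length : Nat) : Int) = k := by
        rw [hblen]; exact hlen
      obtain ⟨r1, r2, r3⟩ := ih _ _ hb' hf' hlen'
      refine ⟨r1, ?_, ?_⟩
      · rw [r2, hfirst, hb2]
        by_cases hkb : k ≤ b
        · rw [if_pos hkb, show b - min b k = b - k by omega]
          have hx := Int.add_mul_ediv_right (b - k) 1 (by omega : k ≠ 0)
          rw [show b - k + 1 * k = b by ring] at hx
          rw [hx]; ring
        · rw [if_neg hkb, show b - min b k = 0 by omega]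
          rw [Int.zero_ediv, Int.ediv_eq_zero_of_lt (by omega) (by omega)]
          ring
      · rw [r3, hlast, hb2, if_pos h0]
        by_cases hkb : k ≤ b
        · rw [show b - min b k = b - k by omega]
          have hx := Int.add_mul_ediv_right (b - k + k - 1) 1 (by omega : k ≠ 0)
          rw [show b - k + k - 1 + 1 * k = b + k - 1 by ring] at hx
          rw [hx]; ring
        · rw [show b - min b k = 0 by omega]
          have h1 : (0 + k - 1) / k = 0 := by
            rw [show (0:Int) + k - 1 = k - 1 by ring]
            exact Int.ediv_eq_zero_of_lt (by omega) (by omega)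
          have h2 : (b + k - 1) / k = 1 := by
            have hx := Int.add_mul_ediv_right (b - 1) 1 (by omega : k ≠ 0)
            rw [show b - 1 + 1 * k = b + k - 1 by ring,
                Int.ediv_eq_zero_of_lt (by omega : (0:Int) ≤ b - 1) (by omega : b - 1 < k)] at hx
            rw [hx]; ring
          rw [h1, h2]; ring

lemma firstLoop_spec (n k : Int) (hk : 0 < k) (K : Nat) (hK : (K : Int) = k) :
    ∀ (d j : Nat), j + d = K → tri j ≤ n →
      firstLoop n (PySem.List.pyRange (j : Int) k 1) (Bk K j) =
        if n < tri K then none else some (Bk K K) := by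
  intro d
  induction d with
  | zero =>
    intro j hj htri
    have : j = K := by omega
    subst this
    rw [hK, PySem.List.pyRange_one_eq_nil le_rfl, firstLoop, if_neg (by omega)]
  | succ d ih =>
    intro j hj htri
    have hjk : (j : Int) < k := by omega
    rw [PySem.List.pyRange_one_cons hjk, firstLoop]
    have hprelen : ((List.range' 1 j).map Int.ofNat).length = j := by simp
    have hBkj : Bk K j =
        (List.range' 1 j).map Int.ofNat ++ (0:Int) :: List.replicate (K - j - 1) 0 := by
      rw [Bk, show K - j = (K - j - 1) + 1 by omega, List.replicate_succ]
      simp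
    have hget : PySem.List.pyGetD (Bk K j) (j : Int) 0 = 0 := by
      rw [PySem.List.pyGetD_natCast, hBkj, getD_mid _ _ _ _ hprelen]
    have hset : PySem.List.pySetD (Bk K j) (j : Int)
        (PySem.List.pyGetD (Bk K j) (j : Int) 0 + ((j : Int) + 1)) = Bk K (j + 1) := by
      rw [hget, PySem.List.pySetD_natCast, hBkj, set_mid _ _ _ _ _ hprelen]
      rw [Bk, List.range'_concat, List.map_append, List.append_assoc,
          show (0 : Int) + ((j:Int) + 1) = Int.ofNat (1 + 1 * j) from by rw [Int.ofNat_eq_natCast]; push_cast; ring,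
          show K - (j + 1) = K - j - 1 from by omega]
      simp
    rw [hset, sum_Bk]
    by_cases hover : tri (j + 1) > n
    · rw [if_pos hover, if_pos]
      have := tri_mono (show j + 1 ≤ K by omega)
      omega
    · rw [if_neg hover]
      have := ih (j + 1) (by omega) (by omega)
      rw [show ((j + 1 : Nat) : Int) = (j : Int) + 1 by push_cast; ring] at this
      exact this

theorem solution_eq (n k : Int) (hk : 0 < k) : solution n k = solution_alt n k := by
  have hK : ((k.toNat : Nat) : Int) = k := by omega
  have hK1 : 1 ≤ k.toNat := by omega
  have htriK : PySem.Int.floordiv (k * (k + 1)) 2 = tri k.toNat := by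
    rw [PySem.Int.floordiv_eq_ediv_of_pos (by omega)]
    rw [← hK, show ((k.toNat : Nat) : Int) * (((k.toNat : Nat) : Int) + 1) = 2 * tri k.toNat by
      rw [tri_two_mul]]
    exact Int.mul_ediv_cancel_left _ (by norm_num)
  have htri0 : (0:Int) ≤ tri k.toNat := by
    have := tri_mono (Nat.zero_le k.toNat); simpa [tri] using this
  have hB0 : List.replicate k.toNat (0:Int) = Bk k.toNat 0 := by simp [Bk]
  by_cases hn : n < tri k.toNat
  · -- infeasible: both return -1
    have hnone : firstLoop n (PySem.List.pyRange 0 k 1) (List.replicate k.toNat 0) = none := by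
      by_cases hn0 : 0 ≤ n
      · rw [hB0]
        have := firstLoop_spec n k hk k.toNat hK k.toNat 0 (by omega) (by simpa [tri] using hn0)
        rw [show (((0:Nat)):Int) = (0:Int) by simp] at this
        rw [this, if_pos hn]
      · have hget : PySem.List.pyGetD (List.replicate k.toNat (0:Int)) 0 0 = 0 := by
          rw [PySem.List.pyGetD_of_nonneg _ _ le_rfl]
          rw [show k.toNat = (k.toNat - 1) + 1 by omega, List.replicate_succ]
          rfl
        have hcond : (PySem.List.pySetD (List.replicate k.toNat (0:Int)) 0
            (PySem.List.pyGetD (List.replicate k.toNat (0:Int)) 0 0 + (0 + 1))).sum > n := by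
          rw [hget, PySem.List.pySetD_of_nonneg _ _ le_rfl,
              show k.toNat = (k.toNat - 1) + 1 by omega, List.replicate_succ]
          simp only [Int.toNat_zero, List.set_cons_zero, List.sum_cons, List.sum_replicate,
            smul_zero, add_zero]
          omega
        rw [PySem.List.pyRange_one_cons (by omega), firstLoop, if_pos hcond]
    rw [solution, solution_alt, firstFold_eq]
    simp only [hnone, htriK, if_pos hn]
  · push_neg at hn
    have hn0 : (0:Int) ≤ n := le_trans htri0 hn
    have hsome := firstLoop_spec n k hk k.toNat hK k.toNat 0 (by omega) (by simpa [tri] using hn0)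
    rw [show (((0:Nat)):Int) = (0:Int) by simp, if_neg (by omega)] at hsome
    rw [solution, hB0, firstFold_eq, hsome]
    simp only []
    rw [pySum_eq_sum, sum_Bk]
    set b0 := n - tri k.toNat with hb0
    have hb0nn : 0 ≤ b0 := by omega
    have hlenB : (((Bk k.toNat k.toNat).length : Nat) : Int) = k := by
      rw [length_Bk _ _ le_rfl]; exact hK
    obtain ⟨rlen, rfirst, rlast⟩ :=
      whileLoop_spec k hk (b0.toNat + 1) b0 (Bk k.toNat k.toNat) hb0nn (by omega) hlenB
    set r := (whileLoop k (b0.toNat + 1) (Bk k.toNat k.toNat) b0).1 with hr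
    have hrlen : r.length = k.toNat := by omega
    -- basket after the first loop: Bk K K = [1, 2, …, K]
    have hBkK : Bk k.toNat k.toNat = (List.range' 1 k.toNat).map Int.ofNat := by
      simp [Bk]
    have hget0B : PySem.List.pyGetD (Bk k.toNat k.toNat) 0 0 = 1 := by
      rw [hBkK, show k.toNat = (k.toNat - 1) + 1 by omega, List.range'_succ]
      simp [PySem.List.pyGetD_zero_cons]
    have hgetlastB : PySem.List.pyGetD (Bk k.toNat k.toNat) (k - 1) 0 = k := by
      rw [PySem.List.pyGetD_eq_getElem _ _ (by omega)
          (by rw [length_Bk _ _ le_rfl]; omega)]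
      rw [List.getElem_of_eq hBkK, List.getElem_map, List.getElem_range']
      rw [Int.ofNat_eq_natCast]
      omega
    -- the two reads of the final basket
    have hrne : r ≠ [] := by
      intro h; rw [h] at hrlen; simp at hrlen; omega
    have hlastr : PySem.List.pyGetD r (-1) 0 = PySem.List.pyGetD r (k - 1) 0 := by
      rw [PySem.List.pyGetD_neg_one _ _ hrne, List.getLast_eq_getElem]
      rw [PySem.List.pyGetD_eq_getElem _ _ (by omega) (by omega)]
      congr 1
      omega
    rw [whileFold_eq k (List.range (b0.toNat + 1)) (Bk k.toNat k.toNat, b0), List.length_range]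
    show PySem.List.pyGetD r (-1) 0 - PySem.List.pyGetD r 0 0 = solution_alt n k
    rw [hlastr, rlast, rfirst, hget0B, hgetlastB]
    rw [solution_alt]
    simp only [htriK, if_neg (by omega : ¬ n < tri k.toNat)]
    rw [PySem.Int.mod_eq_emod_of_pos hk, ← hb0]
    rw [ceil_div_eq k b0 hk hb0nn]
    by_cases hmod : b0 % k ≠ 0 <;> simp [hmod] <;> ring

-- ===== VERDICT (by name: the statement is the Claim_ definition above) =====
theorem solution_spec : Claim_equal_solution := by
  intro n k _ hpre
  exact solution_eq n k hpre
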